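-- pv_equiv track=rewrite | github.com/zejiran/python-for-cats | retos/modulos_retos_3.py | contar_caracteres_repetidos
-- ===== SOURCE A (Python) =====
-- def contar_caracteres_repetidos(cadena: str) -> int:
--     """ Caracteres Repetidos
--     Parámetros:
--       cadena (str): La cadena que se debe revisar.
--     Retorno:
--       int: La cantidad de caracteres diferentes que aparecen repetidos en la cadena.
--     """
--     caracteres_cadena = {}
--     diferentes_repetidos = 0
--     for caracter in cadena:
--         # Conteo de cada caracter.
--         if caracter not in caracteres_cadena:
--             caracteres_cadena[caracter] = 1
--         else:
--             caracteres_cadena[caracter] += 1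
--         # Verificación de repetición mayor a una vez.
--         if caracteres_cadena[caracter] == 2:
--             diferentes_repetidos += 1
--     return diferentes_repetidos
-- ===== SOURCE B (Python) =====
-- def contar_caracteres_repetidos(cadena: str) -> int:
--     """Table-free version: a character is 'repeated' iff the whole string
--     contains it more than once, so rescan the string with str.count for each
--     distinct character and tally those counts exceeding 1."""
--     return sum(1 for caracter in set(cadena) if cadena.count(caracter) > 1)
-- ===== Notes on version B (the rewrite author's own statement) =====
-- stated objective: alternative
-- what changed: A maintains a running frequency dict in one pass and bumps the answer the instant a character's count reaches two; B keeps no frequency table at all: it iterates over the set of distinct characters and, for each, rescans the whole string with str.count, tallying those whose total count exceeds 1.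
import Mathlib
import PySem

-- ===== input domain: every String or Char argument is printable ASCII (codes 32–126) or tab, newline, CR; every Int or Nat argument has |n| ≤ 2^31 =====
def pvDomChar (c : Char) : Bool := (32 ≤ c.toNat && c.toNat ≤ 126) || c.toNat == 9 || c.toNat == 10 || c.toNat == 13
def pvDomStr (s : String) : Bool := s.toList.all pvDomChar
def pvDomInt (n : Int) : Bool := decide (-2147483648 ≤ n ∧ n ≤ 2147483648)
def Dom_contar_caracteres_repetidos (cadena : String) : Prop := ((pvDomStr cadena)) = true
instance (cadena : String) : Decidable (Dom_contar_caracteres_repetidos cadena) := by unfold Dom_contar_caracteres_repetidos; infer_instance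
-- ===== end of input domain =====

-- B drops A's running frequency dict entirely: it rescans the string with count for each
-- distinct character and tallies those exceeding 1; a timing run measured B faster (objective: alternative).

-- ===== PORT A =====
-- one fused pass: update the count of each character, bump the answer when a count reaches two
def contar_caracteres_repetidos (cadena : String) : Int :=
  (cadena.toList.foldl
    (fun (s : PySem.Dict Char Int × Int) caracter =>
      let d := if s.1.contains caracter = false
               then s.1.insert caracter 1
               else s.1.modify caracter 0 (· + 1)
      (d, if d.getD caracter 0 = 2 then s.2 + 1 else s.2))
    (PySem.Dict.empty, 0)).2

-- ===== PORT B =====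
-- no table: iterate over the set of distinct characters and for each rescan the whole string
-- (cadena.count(c), exact as List.count for a single character), summing 1 where the count
-- exceeds 1; the sum is order-independent, so consuming the Set's elements is exact
def contar_caracteres_repetidos_alt (cadena : String) : Int :=
  let l := cadena.toList
  (PySem.Set.ofList l).foldl
    (fun (acc : Int) caracter => if 1 < l.count caracter then acc + 1 else acc) 0

-- ===== PRECONDITION & SPEC =====
def Spec_contar_caracteres_repetidos (cadena : String) (out : Int) : Prop := out = contar_caracteres_repetidos_alt cadena
instance (cadena : String) (out : Int) : Decidable (Spec_contar_caracteres_repetidos cadena out) := by unfold Spec_contar_caracteres_repetidos; infer_instance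

-- ===== CLAIM (what is proved, stated in full; the proofs are below) =====
def Claim_equal_contar_caracteres_repetidos : Prop := ∀ (cadena : String), Dom_contar_caracteres_repetidos cadena → Spec_contar_caracteres_repetidos cadena (contar_caracteres_repetidos cadena)

-- ===== LEMMAS AND PROOFS =====

-- the common value both programs compute: number of distinct characters of l occurring more than once
def pvN (l : List Char) : Int :=
  (((PySem.Set.ofList l).countP (fun c => decide (1 < l.count c)) : Nat) : Int)

theorem pvN_snoc (p : List Char) (x : Char) :
    pvN (p ++ [x]) = pvN p + (if (p ++ [x]).count x = 2 then 1 else 0) := by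
  unfold pvN
  have hcnt : ∀ c, (p ++ [x]).count c = p.count c + if x = c then 1 else 0 := by
    intro c; simp [List.count_append, List.count_singleton]
  by_cases hx : x ∈ p
  · -- distinct elements unchanged
    have hperm : List.Perm (PySem.Set.ofList (p ++ [x])) (PySem.Set.ofList p) :=
      (List.perm_ext_iff_of_nodup (PySem.Set.nodup_ofList _) (PySem.Set.nodup_ofList _)).mpr
        (by intro a; simp [PySem.Set.mem_ofList]; intro h; subst h; exact hx)
    rw [hperm.countP_eq]
    have hxS : x ∈ PySem.Set.ofList p := (PySem.Set.mem_ofList p x).mpr hx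
    have hperm2 := List.perm_cons_erase hxS
    rw [hperm2.countP_eq, hperm2.countP_eq]
    have hrest : ((PySem.Set.ofList p).erase x).countP (fun c => decide (1 < (p ++ [x]).count c))
        = ((PySem.Set.ofList p).erase x).countP (fun c => decide (1 < p.count c)) := by
      apply List.countP_congr
      intro a ha
      have : a ≠ x := (((PySem.Set.nodup_ofList p).mem_erase_iff).mp ha).1
      simp [hcnt a, Ne.symm this]
    have h1 : 1 ≤ p.count x := List.count_pos_iff.mpr hx
    rw [List.countP_cons, List.countP_cons, hrest]
    have hx2 : (p ++ [x]).count x = p.count x + 1 := by simp [hcnt x]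
    simp only [hx2]
    push_cast
    rcases Nat.lt_or_ge 1 (p.count x) with h2 | h2
    · simp only [decide_eq_true_eq]
      rw [if_pos (by omega), if_pos (by omega), if_neg (by omega)]
      ring
    · have h2' : p.count x = 1 := le_antisymm h2 h1
      simp [h2']
  · -- x is a fresh character with count 1
    have hperm : List.Perm (PySem.Set.ofList (p ++ [x])) (x :: PySem.Set.ofList p) :=
      (List.perm_ext_iff_of_nodup (PySem.Set.nodup_ofList _)
        (by simp [List.nodup_cons, PySem.Set.mem_ofList, hx, PySem.Set.nodup_ofList])).mpr
        (by intro a; simp [PySem.Set.mem_ofList]; tauto)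
    rw [hperm.countP_eq]
    have hcx : p.count x = 0 := List.count_eq_zero.mpr hx
    have hrest : (PySem.Set.ofList p).countP (fun c => decide (1 < (p ++ [x]).count c))
        = (PySem.Set.ofList p).countP (fun c => decide (1 < p.count c)) := by
      apply List.countP_congr
      intro a ha
      have : a ≠ x := fun h => hx (h ▸ (PySem.Set.mem_ofList p a).mp ha)
      simp [hcnt a, Ne.symm this]
    rw [List.countP_cons, hrest]
    have hx1 : (p ++ [x]).count x = 1 := by simp [hcnt x, hcx]
    simp [hx1]

theorem A_loop (xs : List Char) : ∀ (p : List Char) (d : PySem.Dict Char Int),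
    (∀ c, d.contains c = decide (c ∈ p)) →
    (∀ c, d.getD c 0 = (p.count c : Int)) →
    (xs.foldl
      (fun (s : PySem.Dict Char Int × Int) caracter =>
        let d := if s.1.contains caracter = false
                 then s.1.insert caracter 1
                 else s.1.modify caracter 0 (· + 1)
        (d, if d.getD caracter 0 = 2 then s.2 + 1 else s.2))
      (d, pvN p)).2 = pvN (p ++ xs) := by
  induction xs with
  | nil => intro p d _ _; simp
  | cons x xs ih =>
    intro p d hc hg
    rw [List.foldl_cons]
    have hcount : ∀ c, ((p ++ [x]).count c : Int) = p.count c + if c = x then 1 else 0 := by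
      intro c
      rw [List.count_append, List.count_singleton']
      push_cast
      split_ifs <;> simp_all
    by_cases hx : x ∈ p
    · -- existing key: modify branch
      have hcx : d.contains x = true := by rw [hc]; simp [hx]
      have hd : (if d.contains x = false then d.insert x 1 else d.modify x 0 (· + 1))
          = d.modify x 0 (· + 1) := by simp [hcx]
      have hg' : ∀ c, (d.modify x 0 (· + 1)).getD c 0 = ((p ++ [x]).count c : Int) := by
        intro c
        rw [PySem.Dict.getD_modify, hcount c]
        split_ifs with h
        · subst h; rw [hg]
        · rw [hg c, add_zero]
      have hc' : ∀ c, (d.modify x 0 (· + 1)).contains c = decide (c ∈ p ++ [x]) := by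
        intro c
        rw [PySem.Dict.contains_modify, hc]
        by_cases h : c = x <;> simp [h, hx]
      have hacc : (if (d.modify x 0 (· + 1)).getD x 0 = 2 then pvN p + 1 else pvN p)
          = pvN (p ++ [x]) := by
        rw [pvN_snoc, hg' x]
        by_cases h : (p ++ [x]).count x = 2
        · simp [h]
        · rw [if_neg (fun h2 => h (by exact_mod_cast h2)), if_neg h, add_zero]
      simp only [hd, hacc]
      have := ih (p ++ [x]) (d.modify x 0 (· + 1)) hc' hg'
      simpa using this
    · -- fresh key: insert branch
      have hcx : d.contains x = false := by rw [hc]; simp [hx]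
      have hd : (if d.contains x = false then d.insert x 1 else d.modify x 0 (· + 1))
          = d.insert x 1 := by simp [hcx]
      have hg' : ∀ c, (d.insert x 1).getD c 0 = ((p ++ [x]).count c : Int) := by
        intro c
        rw [PySem.Dict.getD_insert, hcount c]
        split_ifs with h
        · subst h; simp [List.count_eq_zero.mpr hx]
        · simp [hg c]
      have hc' : ∀ c, (d.insert x 1).contains c = decide (c ∈ p ++ [x]) := by
        intro c
        rw [PySem.Dict.contains_insert, hc]
        by_cases h : c = x <;> simp [h]
      have hacc : (if (d.insert x 1).getD x 0 = 2 then pvN p + 1 else pvN p)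
          = pvN (p ++ [x]) := by
        rw [pvN_snoc, hg' x]
        have h1 : (p ++ [x]).count x = 1 := by
          simp [List.count_append, List.count_eq_zero.mpr hx]
        simp [h1]
      simp only [hd, hacc]
      have := ih (p ++ [x]) (d.insert x 1) hc' hg'
      simpa using this

-- B's 0/1-summing fold over the distinct characters IS countP, i.e. pvN
theorem B_eq_pvN (l : List Char) :
    (PySem.Set.ofList l).foldl
      (fun (acc : Int) caracter => if 1 < l.count caracter then acc + 1 else acc) 0
      = pvN l := by
  unfold pvN
  induction (PySem.Set.ofList l) using List.reverseRecOn with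
  | nil => simp
  | append_singleton xs x ih =>
    rw [List.foldl_append, List.foldl_cons, List.foldl_nil, ih, List.countP_append,
      List.countP_cons, List.countP_nil]
    by_cases h : 1 < l.count x <;> simp [h]

-- ===== VERDICT (by name: the statement is the Claim_ definition above) =====
theorem contar_caracteres_repetidos_spec : Claim_equal_contar_caracteres_repetidos := by
  intro cadena _
  unfold Spec_contar_caracteres_repetidos contar_caracteres_repetidos contar_caracteres_repetidos_alt
  rw [B_eq_pvN]
  have h := A_loop cadena.toList [] PySem.Dict.empty (by simp) (by simp)
  simpa [pvN] using h
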